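-- pv_equiv track=rewrite | github.com/zivg2/ThesisSimulations | circle_sum_decompositions.py | get_difference_data
-- ===== SOURCE A (Python) =====
-- from itertools import product, permutations
--
-- def difference(lists):
--     result = {}
--     list_union = []
--     for l in lists:
--         list_union.extend(l)
--     for coefficients in product([1, -1], repeat=len(lists)):
--         result[coefficients] = []
--         for x in set(list_union):
--             coefficient = sum([lists[i].count(x) * coefficients[i] for i in range(len(lists))])
--             if coefficient != 0:
--                 result[coefficients].append((coefficient, x))
--     return result
--
-- def get_difference_data(results, max_decomposition_length):
--     data = {}
--     exhausted_answers = []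
--     for decomposition_parts in range(1, max_decomposition_length + 1):
--         for lines in permutations(results, r=decomposition_parts):
--             a = difference([x[2] for x in lines])
--             for coefficients in a:
--                 if len(a[coefficients]) == 1 and a[coefficients][0][0] == 1:
--                     character_partition = a[coefficients][0][1]
--                     answer_data = set((coefficients[i], lines[i][:2]) for i in range(len(lines)) if coefficients[i] != 0)
--                     if answer_data in exhausted_answers:
--                         continue
--                     exhausted_answers.append(
--                         answer_data
--                     )
--                     if character_partition not in data:
--                         data[character_partition] = []
--                     data[character_partition].append(answer_data)
--     return data
-- ===== SOURCE B (Python) =====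
-- # B: fused recursive search — permutations are generated by a recursive chooser and the
-- # sign vectors by a binary DFS that carries the accumulated net-coefficient counter down
-- # the tree (prefix sums shared between the 2^(k-i) leaves below a node); no itertools
-- # enumeration of complete sign vectors and no per-vector recount of the characters.
-- def get_difference_data(results, max_decomposition_length):
--     data = {}
--     seen = set()
--
--     def add(counter, chars, mult):
--         counter = dict(counter)
--         for ch in chars:
--             counter[ch] = counter.get(ch, 0) + mult
--         return counter
--
--     def sign_dfs(lines, i, counter, signs):
--         if i == len(lines):
--             nonzero = [(c, ch) for ch, c in counter.items() if c != 0]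
--             if len(nonzero) == 1 and nonzero[0][0] == 1:
--                 character_partition = nonzero[0][1]
--                 answer = frozenset((s, line[:2]) for s, line in zip(signs, lines))
--                 if answer not in seen:
--                     seen.add(answer)
--                     data.setdefault(character_partition, []).append(set(answer))
--             return
--         sign_dfs(lines, i + 1, add(counter, lines[i][2], 1), signs + [1])
--         sign_dfs(lines, i + 1, add(counter, lines[i][2], -1), signs + [-1])
--
--     def perm_dfs(pool, chosen, k):
--         if len(chosen) == k:
--             sign_dfs(chosen, 0, {}, [])
--             return
--         for j in range(len(pool)):
--             perm_dfs(pool[:j] + pool[j + 1:], chosen + [pool[j]], k)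
--
--     for k in range(1, max_decomposition_length + 1):
--         perm_dfs(list(results), [], k)
--     return data
-- ===== Notes on version B (the rewrite author's own statement) =====
-- stated objective: alternative
-- what changed: B replaces A's staged pipeline (itertools.permutations, then the `difference` helper that materialises the full 2^n sign-vector -> reduced-character-list table, then a scan of that table) with a fused recursive search: a recursive permutation chooser and a binary sign-DFS that carries the accumulated net-coefficient counter down the tree, sharing prefix sums between the 2^(k-i) leaves below each node and testing the single-unit-character condition at each leaf; no intermediate table and no per-vector recount.
import Mathlib
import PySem

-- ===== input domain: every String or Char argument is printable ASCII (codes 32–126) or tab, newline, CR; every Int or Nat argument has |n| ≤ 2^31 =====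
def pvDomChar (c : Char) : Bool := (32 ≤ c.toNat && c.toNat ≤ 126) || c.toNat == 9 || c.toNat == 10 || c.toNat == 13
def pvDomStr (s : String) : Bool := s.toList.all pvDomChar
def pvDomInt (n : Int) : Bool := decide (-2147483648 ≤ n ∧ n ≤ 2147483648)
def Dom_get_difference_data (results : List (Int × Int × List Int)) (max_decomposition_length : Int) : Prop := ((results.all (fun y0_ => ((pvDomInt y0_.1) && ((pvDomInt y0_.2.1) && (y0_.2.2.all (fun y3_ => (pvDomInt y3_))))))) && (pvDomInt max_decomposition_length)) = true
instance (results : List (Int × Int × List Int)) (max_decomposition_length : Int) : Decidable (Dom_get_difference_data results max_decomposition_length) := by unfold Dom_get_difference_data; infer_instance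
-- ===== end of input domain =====

-- B replaces A's flat `permutations × product` enumeration with the full 2^n table built by
-- `difference` by a fused recursive search: a recursive permutation chooser and a binary sign-DFS
-- that carries the accumulated net-coefficient counter down the tree; return values proved equal.

-- ===== PORT A =====
-- itertools.product([1, -1], repeat=n): first coordinate varies slowest.
def pvProd11 : Nat → List (List Int)
  | 0 => [[]]
  | n + 1 => [(1 : Int), -1].flatMap (fun s => (pvProd11 n).map (fun t => s :: t))

-- A's `difference`. Python iterates `set(list_union)` in hash order, which PySem does not model;
-- we iterate in first-occurrence order.  (Only entries of length 1 are consumed by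
-- get_difference_data, so its result does not depend on that order.)
-- the inner `for x in set(list_union)` loop of `difference` (one sign vector's list)
def pvDiffList (lists : List (List Int)) (list_union : List Int) (coefficients : List Int) : List (Int × Int) :=
  (PySem.Set.ofList list_union).foldl (fun acc x =>
      let coefficient := (List.range lists.length).foldl
        (fun s i => s + ((lists.getD i []).count x : Int) * coefficients.getD i 0) 0
      if coefficient ≠ 0 then acc ++ [(coefficient, x)] else acc) []

def difference (lists : List (List Int)) : PySem.Dict (List Int) (List (Int × Int)) :=
  let list_union := lists.foldl (fun acc l => acc ++ l) []
  (pvProd11 lists.length).foldl (fun result coefficients =>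
      result.insert coefficients (pvDiffList lists list_union coefficients))
    PySem.Dict.empty

-- the body of A's `for lines in permutations(...)` loop; the state is (data, exhausted_answers).
-- `for coefficients in a: … a[coefficients] …` = fold over a.keys with a getD lookup.
def pvAInner (lines : List (Int × Int × List Int)) (st : PySem.Dict Int (List (List (Int × (Int × Int)))) × List (PySem.Set (Int × (Int × Int)))) : PySem.Dict Int (List (List (Int × (Int × Int)))) × List (PySem.Set (Int × (Int × Int))) :=
  let a := difference (lines.map (fun x => x.2.2))
  a.keys.foldl (fun st coefficients =>
    let v := PySem.Dict.getD a coefficients []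
    if v.length = 1 ∧ (v.getD 0 (0, 0)).1 = 1 then
      let character_partition := (v.getD 0 (0, 0)).2
      let answer_data : PySem.Set (Int × (Int × Int)) := PySem.Set.ofList
        ((List.range lines.length).foldl (fun acc i =>
            if coefficients.getD i 0 ≠ 0 then
              acc ++ [(coefficients.getD i 0, ((lines.getD i (0, 0, [])).1, (lines.getD i (0, 0, [])).2.1))]
            else acc) [])
      if st.2.any (fun s => PySem.Set.equal s answer_data) then st
      else
        let exhausted := st.2 ++ [answer_data]
        let data := if st.1.contains character_partition then st.1 else st.1.insert character_partition []
        (data.insert character_partition (data.getD character_partition [] ++ [answer_data]), exhausted)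
    else st) st

def get_difference_data (results : List (Int × Int × List Int)) (max_decomposition_length : Int) : List (Int × List (List (Int × (Int × Int)))) :=
  let st := (PySem.List.pyRange 1 (max_decomposition_length + 1) 1).foldl (fun st decomposition_parts =>
    (PySem.List.permutations results decomposition_parts.toNat).foldl (fun st lines => pvAInner lines st) st)
    ((PySem.Dict.empty : PySem.Dict Int (List (List (Int × (Int × Int))))), ([] : List (PySem.Set (Int × (Int × Int)))))
  st.1.items

-- ===== PORT B =====
-- B's `add(counter, chars, mult)` (a fresh dict: functional insert-fold)
def pvNetAdd (counter : PySem.Dict Int Int) (chars : List Int) (mult : Int) : PySem.Dict Int Int :=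
  chars.foldl (fun c ch => c.insert ch (c.getD ch 0 + mult)) counter

-- the leaf (`i == len(lines)`) body of B's `sign_dfs`; `seen` membership is set-equality on sets
def pvLeaf (lines : List (Int × Int × List Int)) (counter : PySem.Dict Int Int) (signs : List Int)
    (st : PySem.Dict Int (List (List (Int × (Int × Int)))) × List (PySem.Set (Int × (Int × Int)))) :
    PySem.Dict Int (List (List (Int × (Int × Int)))) × List (PySem.Set (Int × (Int × Int))) :=
  let nonzero : List (Int × Int) := (counter.items.filter (fun p => p.2 ≠ 0)).map (fun p => (p.2, p.1))
  if nonzero.length = 1 ∧ (nonzero.getD 0 ((0, 0) : Int × Int)).1 = 1 then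
    let character_partition := (nonzero.getD 0 ((0, 0) : Int × Int)).2
    let answer : PySem.Set (Int × (Int × Int)) := PySem.Set.ofList
      ((signs.zip lines).map (fun sl => (sl.1, (sl.2.1, sl.2.2.1))))
    if st.2.any (fun s => PySem.Set.equal s answer) then st
    else (st.1.insert character_partition (st.1.getD character_partition [] ++ [answer]), st.2 ++ [answer])
  else st

-- B's `sign_dfs`: Python indexes `lines` with `i`; the port recurses on `rem = lines[i:]`
def pvSignDfs (lines : List (Int × Int × List Int)) (rem : List (Int × Int × List Int))
    (counter : PySem.Dict Int Int) (signs : List Int)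
    (st : PySem.Dict Int (List (List (Int × (Int × Int)))) × List (PySem.Set (Int × (Int × Int)))) :
    PySem.Dict Int (List (List (Int × (Int × Int)))) × List (PySem.Set (Int × (Int × Int))) :=
  match rem with
  | [] => pvLeaf lines counter signs st
  | l :: rest =>
    let st := pvSignDfs lines rest (pvNetAdd counter l.2.2 1) (signs ++ [1]) st
    pvSignDfs lines rest (pvNetAdd counter l.2.2 (-1)) (signs ++ [-1]) st

-- B's `perm_dfs`; `.attach` only supplies `j < len(pool)` for termination
def pvPermDfs (k : Nat) (pool : List (Int × Int × List Int)) (chosen : List (Int × Int × List Int))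
    (st : PySem.Dict Int (List (List (Int × (Int × Int)))) × List (PySem.Set (Int × (Int × Int)))) :
    PySem.Dict Int (List (List (Int × (Int × Int)))) × List (PySem.Set (Int × (Int × Int))) :=
  if chosen.length = k then pvSignDfs chosen chosen PySem.Dict.empty [] st
  else (List.range pool.length).attach.foldl
    (fun st j => pvPermDfs k (pool.take j.1 ++ pool.drop (j.1 + 1)) (chosen ++ [pool.getD j.1 (0, 0, [])]) st) st
termination_by pool.length
decreasing_by
  have hj := List.mem_range.1 j.2
  simp only [List.length_append, List.length_take, List.length_drop]
  omega

def get_difference_data_alt (results : List (Int × Int × List Int)) (max_decomposition_length : Int) : List (Int × List (List (Int × (Int × Int)))) :=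
  let st := (PySem.List.pyRange 1 (max_decomposition_length + 1) 1).foldl (fun st k =>
      pvPermDfs k.toNat results [] st)
    ((PySem.Dict.empty : PySem.Dict Int (List (List (Int × (Int × Int))))), ([] : List (PySem.Set (Int × (Int × Int)))))
  st.1.items

-- ===== PRECONDITION & SPEC =====
def Spec_get_difference_data (results : List (Int × Int × List Int)) (max_decomposition_length : Int) (out : List (Int × List (List (Int × (Int × Int))))) : Prop := out = get_difference_data_alt results max_decomposition_length
instance (results : List (Int × Int × List Int)) (max_decomposition_length : Int) (out : List (Int × List (List (Int × (Int × Int))))) : Decidable (Spec_get_difference_data results max_decomposition_length out) := by unfold Spec_get_difference_data; infer_instance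

-- ===== CLAIM (what is proved, stated in full; the proofs are below) =====
def Claim_equal_get_difference_data : Prop := ∀ (results : List (Int × Int × List Int)) (max_decomposition_length : Int), Dom_get_difference_data results max_decomposition_length → Spec_get_difference_data results max_decomposition_length (get_difference_data results max_decomposition_length)

-- ===== LEMMAS AND PROOFS =====

-- the flat (per-complete-sign-vector) form of B's search for one permutation; bridge to A
def pvBInner (lines : List (Int × Int × List Int)) (st : PySem.Dict Int (List (List (Int × (Int × Int)))) × List (PySem.Set (Int × (Int × Int)))) : PySem.Dict Int (List (List (Int × (Int × Int)))) × List (PySem.Set (Int × (Int × Int))) :=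
  (pvProd11 lines.length).foldl (fun st signs =>
    pvLeaf lines ((signs.zip lines).foldl (fun c sl => pvNetAdd c sl.2.2.2 sl.1) PySem.Dict.empty) signs st) st

-- Σᵢ signsᵢ · countₓ(linesᵢ[2]) over the zipped pairs
def pvCoeff (pairs : List (Int × (Int × Int × List Int))) (x : Int) : Int :=
  (pairs.map (fun sl => sl.1 * (sl.2.2.2.count x : Int))).sum

theorem pvProd11_mem {s : List Int} {n : Nat} (h : s ∈ pvProd11 n) :
    s.length = n ∧ ∀ x ∈ s, x = 1 ∨ x = -1 := by
  induction n generalizing s with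
  | zero => simp [pvProd11] at h; simp [h]
  | succ n ih =>
    simp only [pvProd11, List.flatMap_cons, List.flatMap_nil, List.append_nil, List.mem_append,
      List.mem_map] at h
    rcases h with ⟨t, ht, rfl⟩ | ⟨t, ht, rfl⟩
    · obtain ⟨h1, h2⟩ := ih ht
      refine ⟨by simp [h1], ?_⟩
      intro x hx; rcases List.mem_cons.1 hx with rfl | hx
      · exact Or.inl rfl
      · exact h2 x hx
    · obtain ⟨h1, h2⟩ := ih ht
      refine ⟨by simp [h1], ?_⟩
      intro x hx; rcases List.mem_cons.1 hx with rfl | hx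
      · exact Or.inr rfl
      · exact h2 x hx

theorem pvProd11_nodup (n : Nat) : (pvProd11 n).Nodup := by
  induction n with
  | zero => simp [pvProd11]
  | succ n ih =>
    simp only [pvProd11, List.flatMap_cons, List.flatMap_nil, List.append_nil]
    rw [List.nodup_append]
    refine ⟨ih.map (fun a b h => by simpa using h), ih.map (fun a b h => by simpa using h), ?_⟩
    intro a ha b hb
    simp only [List.mem_map] at ha hb
    obtain ⟨t, _, rfl⟩ := ha; obtain ⟨u, _, rfl⟩ := hb
    simp

theorem pv_foldl_ext {α β : Type} (f g : β → α → β) (b : β) {l : List α}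
    (H : ∀ acc, ∀ x ∈ l, f acc x = g acc x) : l.foldl f b = l.foldl g b := by
  induction l generalizing b with
  | nil => rfl
  | cons x xs ih =>
    simp only [List.foldl_cons]; rw [H b x (by simp)]
    exact ih _ (fun acc y hy => H acc y (by simp [hy]))

theorem pv_foldl_if_append {α β : Type} (q : α → Prop) [DecidablePred q] (g : α → β)
    (l : List α) (acc : List β) :
    l.foldl (fun acc x => if q x then acc ++ [g x] else acc) acc
      = acc ++ (l.filter (fun x => decide (q x))).map g := by
  induction l generalizing acc with
  | nil => simp
  | cons x xs ih =>
    by_cases hx : q x <;> simp [hx, ih]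

theorem pv_unionfold (L : List (List Int)) :
    L.foldl (fun acc l => acc ++ l) [] = L.flatten := by
  suffices h : ∀ acc, L.foldl (fun acc l => acc ++ l) acc = acc ++ L.flatten by simpa using h []
  induction L with
  | nil => simp
  | cons l t ih => intro acc; simp [ih, List.append_assoc]

theorem pv_inner_net_getD (l : List Int) (s : Int) (d : PySem.Dict Int Int) (x : Int) :
    (l.foldl (fun net ch => net.insert ch (net.getD ch 0 + s)) d).getD x 0
      = d.getD x 0 + s * (l.count x : Int) := by
  induction l generalizing d with
  | nil => simp
  | cons ch t ih =>
    simp only [List.foldl_cons, ih, PySem.Dict.getD_insert, List.count_cons]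
    by_cases h : x = ch
    · subst h; simp; ring
    · have hxc : ¬ ((ch == x) = true) := by simpa using fun e => h (by simp [e])
      simp [h, hxc]

theorem pv_net_getD (pairs : List (Int × (Int × Int × List Int))) (d : PySem.Dict Int Int) (x : Int) :
    (pairs.foldl (fun net sl => sl.2.2.2.foldl (fun net ch => net.insert ch (net.getD ch 0 + sl.1)) net) d).getD x 0
      = d.getD x 0 + pvCoeff pairs x := by
  induction pairs generalizing d with
  | nil => simp [pvCoeff]
  | cons p t ih =>
    simp only [List.foldl_cons, ih, pv_inner_net_getD, pvCoeff, List.map_cons, List.sum_cons]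
    ring

theorem pv_net_keys (pairs : List (Int × (Int × Int × List Int))) (d : PySem.Dict Int Int) :
    (pairs.foldl (fun net sl => sl.2.2.2.foldl (fun net ch => net.insert ch (net.getD ch 0 + sl.1)) net) d).keys
      = PySem.Set.update d.keys (pairs.map (fun p => p.2.2.2)).flatten := by
  induction pairs generalizing d with
  | nil => simp [PySem.Set.update]
  | cons p t ih =>
    simp only [List.foldl_cons, ih, PySem.Dict.keys_foldl_insert, List.map_cons, List.flatten_cons,
      PySem.Set.update_append]

theorem pv_net_nodup (pairs : List (Int × (Int × Int × List Int))) (d : PySem.Dict Int Int)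
    (h : d.keys.Nodup) :
    (pairs.foldl (fun net sl => sl.2.2.2.foldl (fun net ch => net.insert ch (net.getD ch 0 + sl.1)) net) d).keys.Nodup := by
  induction pairs generalizing d with
  | nil => exact h
  | cons p t ih => exact ih _ (PySem.Dict.nodup_keys_foldl_insert _ _ _ h)

theorem pv_zip_map_snd (lines : List (Int × Int × List Int)) (signs : List Int)
    (hlen : signs.length = lines.length) :
    (signs.zip lines).map (fun sl => sl.2.2.2) = lines.map (fun x => x.2.2) := by
  have h : (signs.zip lines).map (fun sl => sl.2.2.2)
      = ((signs.zip lines).map Prod.snd).map (fun x => x.2.2) := by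
    simp [List.map_map]
  rw [h, List.map_snd_zip (by omega)]

-- A's range-indexed coefficient sum is the weighted count over the zipped pairs
theorem pv_rangefold_coeff (lines : List (Int × Int × List Int)) (signs : List Int) (x : Int)
    (hlen : signs.length = lines.length) :
    (List.range (lines.map (fun x => x.2.2)).length).foldl
        (fun s i => s + (((lines.map (fun x => x.2.2)).getD i []).count x : Int) * signs.getD i 0) 0
      = pvCoeff (signs.zip lines) x := by
  rw [PySem.List.foldl_add (g := fun i => (((lines.map (fun x => x.2.2)).getD i []).count x : Int) * signs.getD i 0)]
  rw [zero_add, pvCoeff]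
  congr 1
  apply List.ext_getElem
  · simp [hlen]
  · intro i h1 h2
    have hi : i < lines.length := by simpa using h1
    have hs : i < signs.length := by omega
    simp [List.getD_eq_getElem?_getD, hi, hs, mul_comm]

theorem pv_v_eq (lines : List (Int × Int × List Int)) (signs : List Int)
    (hlen : signs.length = lines.length) :
    pvDiffList (lines.map (fun x => x.2.2))
        ((lines.map (fun x => x.2.2)).foldl (fun acc l => acc ++ l) []) signs
      = (((signs.zip lines).foldl (fun net sl =>
            sl.2.2.2.foldl (fun net ch => net.insert ch (net.getD ch 0 + sl.1)) net)
          (PySem.Dict.empty : PySem.Dict Int Int)).items.filter (fun p => p.2 ≠ 0)).map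
          (fun p => (p.2, p.1)) := by
  have hnodup : ((signs.zip lines).foldl (fun net sl =>
      sl.2.2.2.foldl (fun net ch => net.insert ch (net.getD ch 0 + sl.1)) net)
      (PySem.Dict.empty : PySem.Dict Int Int)).keys.Nodup := by
    apply pv_net_nodup; simp
  rw [PySem.Dict.items_eq_map_keys _ hnodup 0, pv_net_keys]
  have hkeys : PySem.Set.update (PySem.Dict.empty : PySem.Dict Int Int).keys
      ((signs.zip lines).map (fun p => p.2.2.2)).flatten
      = PySem.Set.ofList ((lines.map (fun x => x.2.2)).flatten) := by
    rw [pv_zip_map_snd lines signs hlen]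
    simp [PySem.Set.update_nil_left]
  rw [hkeys]
  have hgetD : ∀ k : Int, ((signs.zip lines).foldl (fun net sl =>
      sl.2.2.2.foldl (fun net ch => net.insert ch (net.getD ch 0 + sl.1)) net)
      (PySem.Dict.empty : PySem.Dict Int Int)).getD k 0 = pvCoeff (signs.zip lines) k := by
    intro k; rw [pv_net_getD]; simp
  simp only [hgetD]
  rw [pvDiffList, pv_unionfold]
  have hc : ∀ k : Int, (List.range (lines.map (fun x => x.2.2)).length).foldl
      (fun s i => s + (((lines.map (fun x => x.2.2)).getD i []).count k : Int) * signs.getD i 0) 0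
      = pvCoeff (signs.zip lines) k := fun k => pv_rangefold_coeff lines signs k hlen
  simp only [hc]
  rw [pv_foldl_if_append (q := fun x => pvCoeff (signs.zip lines) x ≠ 0)
    (g := fun x => (pvCoeff (signs.zip lines) x, x))]
  rw [List.filter_map, List.map_map]
  simp [Function.comp_def]

theorem pv_answer_eq (lines : List (Int × Int × List Int)) (signs : List Int)
    (hlen : signs.length = lines.length) (hpm : ∀ x ∈ signs, x = 1 ∨ x = -1) :
    (List.range lines.length).foldl (fun acc i =>
        if signs.getD i 0 ≠ 0 then
          acc ++ [(signs.getD i 0, ((lines.getD i (0, 0, [])).1, (lines.getD i (0, 0, [])).2.1))]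
        else acc) []
      = (signs.zip lines).map (fun sl => (sl.1, (sl.2.1, sl.2.2.1))) := by
  rw [pv_foldl_if_append (q := fun i => signs.getD i 0 ≠ 0)
    (g := fun i => (signs.getD i 0, ((lines.getD i (0, 0, [])).1, (lines.getD i (0, 0, [])).2.1)))]
  have hfil : (List.range lines.length).filter (fun i => decide (signs.getD i 0 ≠ 0))
      = List.range lines.length := by
    apply List.filter_eq_self.2
    intro i hi
    have hs : i < signs.length := by rw [hlen]; simpa using hi
    rcases hpm signs[i] (by simp) with h | h <;>
      simp [List.getD_eq_getElem?_getD, List.getElem?_eq_getElem hs, h]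
  rw [hfil, List.nil_append]
  apply List.ext_getElem
  · simp [hlen]
  · intro i h1 h2
    have hi : i < lines.length := by simpa using h1
    have hs : i < signs.length := by omega
    simp [List.getD_eq_getElem?_getD, hi, hs]

theorem pv_data_update (data : PySem.Dict Int (List (List (Int × (Int × Int))))) (cp : Int)
    (ad : List (Int × (Int × Int))) :
    ((if data.contains cp then data else data.insert cp []).insert cp
      ((if data.contains cp then data else data.insert cp []).getD cp [] ++ [ad]))
      = data.insert cp (data.getD cp [] ++ [ad]) := by
  by_cases h : data.contains cp = true
  · simp [h]
  · have h' : data.contains cp = false := by simpa using h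
    simp only [h', Bool.false_eq_true, if_false]
    simp [h', PySem.Dict.getD_insert_self, PySem.Dict.insert_insert_self,
      PySem.Dict.getD_of_not_contains]

-- an insert loop over distinct fresh keys appends (key, value-for-that-key)
theorem pv_fold_insert_items (g : List Int → List (Int × Int)) :
    ∀ (ks : List (List Int)) (d : PySem.Dict (List Int) (List (Int × Int))),
      (∀ kk ∈ ks, d.contains kk = false) → ks.Nodup →
      (ks.foldl (fun result coefficients => result.insert coefficients (g coefficients)) d).items
        = d.items ++ ks.map (fun kk => (kk, g kk)) := by
  intro ks
  induction ks with
  | nil => intro d _ _; simp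
  | cons k t ih =>
    intro d hfresh hnd
    rw [List.foldl_cons]
    have hk : d.contains k = false := hfresh k (by simp)
    have hfresh' : ∀ kk ∈ t, (d.insert k (g k)).contains kk = false := by
      intro kk hkk
      have hne : kk ≠ k := by
        intro e; exact (List.nodup_cons.1 hnd).1 (e ▸ hkk)
      rw [PySem.Dict.contains_insert]
      simp [hne, hfresh kk (by simp [hkk])]
    rw [ih (d.insert k (g k)) hfresh' (List.nodup_cons.1 hnd).2,
      PySem.Dict.items_insert_of_not_contains _ _ hk]
    simp

set_option maxHeartbeats 1600000 in
theorem pv_inner_eq (lines : List (Int × Int × List Int))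
    (st : PySem.Dict Int (List (List (Int × (Int × Int)))) × List (PySem.Set (Int × (Int × Int)))) :
    pvAInner lines st = pvBInner lines st := by
  unfold pvAInner pvBInner
  simp only [pvLeaf, pvNetAdd]
  have hitems : (difference (lines.map (fun x => x.2.2))).items
      = (pvProd11 (lines.map (fun x => x.2.2)).length).map
          (fun k => (k, pvDiffList (lines.map (fun x => x.2.2))
            ((lines.map (fun x => x.2.2)).foldl (fun acc l => acc ++ l) []) k)) := by
    unfold difference
    rw [pv_fold_insert_items _ _ _ (by intro kk _; simp) (pvProd11_nodup _)]
    simp [show (PySem.Dict.empty : PySem.Dict (List Int) (List (Int × Int))).items = [] from rfl]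
  have hkeys : (difference (lines.map (fun x => x.2.2))).keys
      = pvProd11 lines.length := by
    simp only [PySem.Dict.keys, hitems, List.map_map]
    simp [Function.comp_def]
  have hnodupk : (difference (lines.map (fun x => x.2.2))).keys.Nodup := by
    rw [hkeys]; exact pvProd11_nodup _
  rw [hkeys]
  apply pv_foldl_ext
  intro acc signs hmem
  obtain ⟨hlen, hpm⟩ := pvProd11_mem hmem
  have hv : PySem.Dict.getD (difference (lines.map (fun x => x.2.2))) signs []
      = pvDiffList (lines.map (fun x => x.2.2))
          ((lines.map (fun x => x.2.2)).foldl (fun acc l => acc ++ l) []) signs := by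
    refine PySem.Dict.getD_of_mem_items _ ?_ hnodupk _
    rw [hitems]
    exact List.mem_map.2 ⟨signs, by simpa using hmem, rfl⟩
  rw [hv, pv_v_eq lines signs hlen, pv_answer_eq lines signs hlen hpm, pv_data_update]

-- foldl over a flatMap is the nested foldl
theorem pv_foldl_flatMap {α β γ : Type} (f : α → List β) (g : γ → β → γ) (l : List α) (b : γ) :
    (l.flatMap f).foldl g b = l.foldl (fun b a => (f a).foldl g b) b := by
  induction l generalizing b with
  | nil => rfl
  | cons x xs ih => simp [List.foldl_append, ih]

-- the sign DFS equals the flat fold over all complete sign vectors, counters rebuilt per vector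
theorem pv_sign_dfs_eq (lines : List (Int × Int × List Int)) :
    ∀ (rem : List (Int × Int × List Int)) (counter : PySem.Dict Int Int) (signs : List Int)
      (st : PySem.Dict Int (List (List (Int × (Int × Int)))) × List (PySem.Set (Int × (Int × Int)))),
    pvSignDfs lines rem counter signs st
      = (pvProd11 rem.length).foldl (fun st t =>
          pvLeaf lines ((t.zip rem).foldl (fun c sl => pvNetAdd c sl.2.2.2 sl.1) counter) (signs ++ t) st) st := by
  intro rem
  induction rem with
  | nil => intro c s st; simp [pvSignDfs, pvProd11]
  | cons l rest ih =>
    intro c s st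
    simp only [pvSignDfs]
    rw [ih, ih]
    simp only [List.length_cons, pvProd11, List.flatMap_cons, List.flatMap_nil, List.append_nil,
      List.foldl_append, List.foldl_map, List.zip_cons_cons, List.foldl_cons, List.append_assoc,
      List.singleton_append]

theorem pv_sign_top (lines : List (Int × Int × List Int))
    (st : PySem.Dict Int (List (List (Int × (Int × Int)))) × List (PySem.Set (Int × (Int × Int)))) :
    pvSignDfs lines lines PySem.Dict.empty [] st = pvBInner lines st := by
  rw [pv_sign_dfs_eq]
  simp only [List.nil_append]
  rfl

-- the permutation DFS equals the fold over PySem.List.permutations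
theorem pv_perm_dfs_eq (k : Nat) :
    ∀ (m : Nat) (pool chosen : List (Int × Int × List Int))
      (st : PySem.Dict Int (List (List (Int × (Int × Int)))) × List (PySem.Set (Int × (Int × Int)))),
    chosen.length + m = k →
    pvPermDfs k pool chosen st
      = (PySem.List.permutations pool m).foldl
          (fun st tail => pvSignDfs (chosen ++ tail) (chosen ++ tail) PySem.Dict.empty [] st) st := by
  intro m
  induction m with
  | zero =>
    intro pool chosen st h
    unfold pvPermDfs
    rw [if_pos (by omega)]
    simp [PySem.List.permutations]
  | succ m ih =>
    intro pool chosen st h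
    unfold pvPermDfs
    rw [if_neg (by omega)]
    rw [List.foldl_attach (l := List.range pool.length)
      (f := fun st j => pvPermDfs k (List.take j pool ++ List.drop (j + 1) pool)
        (chosen ++ [pool.getD j (0, 0, [])]) st)]
    show _ = (PySem.List.permutations pool (m + 1)).foldl _ st
    rw [PySem.List.permutations]
    rw [pv_foldl_flatMap]
    apply pv_foldl_ext
    intro acc j hj
    have hj' : j < pool.length := List.mem_range.1 hj
    have hx : pool[j]? = some pool[j] := List.getElem?_eq_getElem hj'
    rw [ih _ _ _ (by simp; omega), hx]
    simp only [List.foldl_map, List.eraseIdx_eq_take_drop_succ]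
    rw [List.getD_eq_getElem _ _ hj']
    apply pv_foldl_ext
    intro acc2 tail _
    simp [List.append_assoc]

-- ===== VERDICT (by name: the statement is the Claim_ definition above) =====
set_option maxHeartbeats 1600000 in
theorem get_difference_data_spec : Claim_equal_get_difference_data := by
  intro results max_decomposition_length _
  unfold Spec_get_difference_data get_difference_data get_difference_data_alt
  have hin : ∀ (k : Nat)
      (st : PySem.Dict Int (List (List (Int × (Int × Int)))) × List (PySem.Set (Int × (Int × Int)))),
      pvPermDfs k results [] st
        = (PySem.List.permutations results k).foldl (fun st lines => pvAInner lines st) st := by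
    intro k st
    rw [pv_perm_dfs_eq k k results [] st (by simp)]
    apply pv_foldl_ext
    intro acc tail _
    rw [List.nil_append, pv_sign_top, ← pv_inner_eq]
  simp only [hin]
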